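-- pv_equiv track=rewrite | github.com/Darwinky25/DARWIN-with-ALLA-engine | alla_visual_teacher.py | _has_vertical_lines
-- ===== SOURCE A (Python) =====
-- from typing import List, Dict, Any, Optional, Tuple
--
-- def _has_vertical_lines(grid: List[List[int]]) -> bool:
--     """Check for vertical line patterns."""
--     if not grid:
--         return False
--
--     for col in range(len(grid[0])):
--         column = [grid[row][col] for row in range(len(grid))]
--         if len(set(column)) == 1 and column[0] != 0:
--             return True
--     return False
-- ===== SOURCE B (Python) =====
-- def _has_vertical_lines(grid):
--     """Check for vertical line patterns (row-major single pass over candidate columns)."""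
--     if not grid:
--         return False
--     expected = grid[0]
--     candidate = [v != 0 for v in expected]
--     for row in grid[1:]:
--         candidate = [ok and row[c] == expected[c] for c, ok in enumerate(candidate)]
--     return any(candidate)
-- ===== Notes on version B (the rewrite author's own statement) =====
-- stated objective: alternative
-- what changed: Column-major scan that materializes each column list and builds a set of it is replaced by a row-major single pass maintaining a boolean candidate array per column checked against the first row; no column lists or sets are built.
-- outside the precondition, e.g. on _has_vertical_lines([[1, 2], [1]]): A returns True, B raises IndexError
import Mathlib
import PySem

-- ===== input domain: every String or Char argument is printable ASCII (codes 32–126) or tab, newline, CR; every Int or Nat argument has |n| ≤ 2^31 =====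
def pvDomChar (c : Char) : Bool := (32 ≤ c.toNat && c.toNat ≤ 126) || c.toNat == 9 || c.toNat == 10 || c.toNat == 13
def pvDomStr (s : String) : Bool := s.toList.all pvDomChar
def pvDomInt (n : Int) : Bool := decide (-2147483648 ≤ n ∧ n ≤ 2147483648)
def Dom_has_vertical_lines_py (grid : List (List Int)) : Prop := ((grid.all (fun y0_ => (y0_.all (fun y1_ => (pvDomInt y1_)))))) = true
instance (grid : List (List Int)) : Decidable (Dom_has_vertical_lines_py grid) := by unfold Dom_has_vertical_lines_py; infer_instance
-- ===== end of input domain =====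

-- B replaces A's column-major scan (building each column list and a set of it) by a
-- row-major single pass maintaining per-column candidate booleans; alternative structure, same cost.

-- ===== PORT A =====
-- column = [grid[row][col] for row in range(len(grid))] ; pyGetD is exact on Pre_ (indices in range)
def hvlColumn (grid : List (List Int)) (col : Nat) : List Int :=
  (List.range grid.length).map (fun (row : Nat) =>
    PySem.List.pyGetD (PySem.List.pyGetD grid (row : Int) []) (col : Int) 0)

-- the for-loop over `range(len(grid[0]))` with early `return True`
def hvlGo (grid : List (List Int)) : List Nat → Bool
  | [] => false
  | col :: rest =>
    let column := hvlColumn grid col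
    if (PySem.Set.ofList column).length = 1 ∧ PySem.List.pyGetD column 0 0 ≠ 0 then true
    else hvlGo grid rest

def has_vertical_lines_py (grid : List (List Int)) : Bool :=
  if grid = [] then false
  else hvlGo grid (List.range (grid.headD []).length)

-- ===== PORT B =====
-- candidate = [ok and row[c] == expected[c] for c, ok in enumerate(candidate)]
def hvlStep (expected : List Int) (cand : List Bool) (row : List Int) : List Bool :=
  (PySem.List.enumerate cand).map (fun p =>
    p.2 && (PySem.List.pyGetD row p.1 0 == PySem.List.pyGetD expected p.1 0))

def has_vertical_lines_py_alt (grid : List (List Int)) : Bool :=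
  if grid = [] then false
  else
    let expected := grid.headD []
    let init := expected.map (fun v => decide (v ≠ 0))
    let final := (PySem.List.slice grid (some 1) none).foldl (hvlStep expected) init
    final.any id

-- ===== PRECONDITION & SPEC =====
-- Pre_ excludes ragged grids having a row shorter than the first row: there the column-major A and
-- the row-major B hit the missing cell in different orders, so one can raise IndexError where the
-- other still returns.
def Pre_has_vertical_lines_py (grid : List (List Int)) : Prop :=
  ∀ row ∈ grid, (grid.headD []).length ≤ row.length
instance (grid : List (List Int)) : Decidable (Pre_has_vertical_lines_py grid) := by
  unfold Pre_has_vertical_lines_py; infer_instance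

def pvWitness_has_vertical_lines_py : List (List Int) := [[1, 0], [1, 2]]

def Spec_has_vertical_lines_py (grid : List (List Int)) (out : Bool) : Prop := out = has_vertical_lines_py_alt grid
instance (grid : List (List Int)) (out : Bool) : Decidable (Spec_has_vertical_lines_py grid out) := by unfold Spec_has_vertical_lines_py; infer_instance

-- ===== CLAIM (what is proved, stated in full; the proofs are below) =====
def Claim_equal_has_vertical_lines_py : Prop := ∀ (grid : List (List Int)), Dom_has_vertical_lines_py grid → Pre_has_vertical_lines_py grid → Spec_has_vertical_lines_py grid (has_vertical_lines_py grid)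

-- ===== LEMMAS AND PROOFS =====

-- A's early-return loop is List.any of its branch condition
theorem hvlGo_eq_any (grid : List (List Int)) (cols : List Nat) :
    hvlGo grid cols = cols.any (fun col =>
      decide ((PySem.Set.ofList (hvlColumn grid col)).length = 1 ∧
              PySem.List.pyGetD (hvlColumn grid col) 0 0 ≠ 0)) := by
  induction cols with
  | nil => rfl
  | cons c rest ih =>
    simp only [hvlGo, List.any_cons, ← ih]
    split_ifs with h <;> simp [h]

-- a set has one element iff the source list is nonempty with all elements equal to its head
theorem ofList_length_one_iff (l : List Int) (hl : l ≠ []) :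
    (PySem.Set.ofList l).length = 1 ↔ ∀ x ∈ l, x = l.headD 0 := by
  have hhd : l.headD 0 ∈ l := by
    cases l with
    | nil => exact absurd rfl hl
    | cons b t => simp
  constructor
  · intro h x hx
    obtain ⟨a, ha⟩ := List.length_eq_one_iff.mp h
    have hxa : x = a := by
      have := (PySem.Set.mem_ofList l x).mpr hx
      simpa [ha] using this
    have hha : l.headD 0 = a := by
      have := (PySem.Set.mem_ofList l (l.headD 0)).mpr hhd
      simpa [ha] using this
    rw [hxa, hha]
  · intro h
    have hnd : (PySem.Set.ofList l).Nodup := PySem.Set.nodup_ofList l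
    have hmem : ∀ x ∈ PySem.Set.ofList l, x = l.headD 0 := by
      intro x hx
      exact h x ((PySem.Set.mem_ofList l x).mp hx)
    have hne : l.headD 0 ∈ PySem.Set.ofList l := (PySem.Set.mem_ofList l _).mpr hhd
    cases hs : PySem.Set.ofList l with
    | nil => rw [hs] at hne; simp at hne
    | cons a t =>
      rw [hs] at hmem hnd
      have ha : a = l.headD 0 := hmem a (by simp)
      cases t with
      | nil => rfl
      | cons b t' =>
        have hb : b = l.headD 0 := hmem b (by simp)
        have : a ≠ b := by
          have := List.nodup_cons.mp hnd
          intro e; exact this.1 (e ▸ List.mem_cons_self ..)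
        exact absurd (ha.trans hb.symm) this

-- the column list is the per-row projection
theorem hvlColumn_eq_map (grid : List (List Int)) (c : Nat) :
    hvlColumn grid c = grid.map (fun row => row.getD c 0) := by
  apply List.ext_getElem
  · simp [hvlColumn]
  · intro i h1 h2
    have hi : i < grid.length := by simpa using h2
    unfold hvlColumn
    rw [List.getElem_map, List.getElem_map, List.getElem_range,
      PySem.List.pyGetD_natCast, PySem.List.pyGetD_natCast]
    rw [List.getD_eq_getElem?_getD (a := ([] : List Int)), List.getElem?_eq_getElem hi]
    rfl

theorem hvlStep_length (e : List Int) (cand : List Bool) (row : List Int) :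
    (hvlStep e cand row).length = cand.length := by
  simp [hvlStep, PySem.List.length_enumerate]

-- one B step, pointwise
theorem hvlStep_getD (e : List Int) (cand : List Bool) (row : List Int) (c : Nat) :
    (hvlStep e cand row).getD c false
      = (cand.getD c false && (row.getD c 0 == e.getD c 0)) := by
  unfold hvlStep
  by_cases h : c < cand.length
  · rw [List.getD_eq_getElem?_getD, List.getElem?_map, PySem.List.getElem?_enumerate]
    rw [List.getElem?_eq_getElem h]
    simp [List.getD_eq_getElem?_getD, List.getElem?_eq_getElem h, PySem.List.pyGetD_natCast]
  · have h1 : cand.getD c false = false := by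
      rw [List.getD_eq_getElem?_getD, List.getElem?_eq_none (by omega)]; rfl
    rw [h1, Bool.false_and, List.getD_eq_getElem?_getD, List.getElem?_eq_none]
    · rfl
    · rw [List.length_map, PySem.List.length_enumerate]; omega

-- the whole B fold, pointwise
theorem hvlFold_getD (e : List Int) (rows : List (List Int)) (cand : List Bool) (c : Nat) :
    ((rows.foldl (hvlStep e) cand).getD c false)
      = (cand.getD c false && rows.all (fun row => row.getD c 0 == e.getD c 0)) := by
  induction rows generalizing cand with
  | nil => simp
  | cons r rs ih =>
    simp only [List.foldl_cons, List.all_cons, ih, hvlStep_getD, Bool.and_assoc]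

theorem hvlFold_length (e : List Int) (rows : List (List Int)) (cand : List Bool) :
    (rows.foldl (hvlStep e) cand).length = cand.length := by
  induction rows generalizing cand with
  | nil => rfl
  | cons r rs ih => simp [List.foldl_cons, ih, hvlStep_length]

theorem any_congr_mem {α : Type} (l : List α) (f g : α → Bool)
    (h : ∀ x ∈ l, f x = g x) : l.any f = l.any g := by
  induction l with
  | nil => rfl
  | cons a t ih =>
    simp only [List.any_cons, h a (List.mem_cons_self ..),
      ih (fun x hx => h x (List.mem_cons_of_mem _ hx))]

-- any id over a Bool list as any over its index range
theorem any_id_eq_range (l : List Bool) :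
    l.any id = (List.range l.length).any (fun c => l.getD c false) := by
  induction l with
  | nil => rfl
  | cons a t ih =>
    rw [List.any_cons, List.length_cons, List.range_succ_eq_map, List.any_cons,
      List.any_map, ih]
    simp only [id, List.getD_cons_zero, Function.comp_def]
    have h2 := any_congr_mem (List.range t.length)
      (fun c => (a :: t).getD (Nat.succ c) false) (fun c => t.getD c false)
      (by intro c _; simp)
    rw [h2]

-- ===== VERDICT (by name: the statement is the Claim_ definition above) =====
theorem has_vertical_lines_py_spec : Claim_equal_has_vertical_lines_py := by
  intro grid _dom _pre
  unfold Spec_has_vertical_lines_py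
  cases grid with
  | nil => rfl
  | cons g0 gs =>
    unfold has_vertical_lines_py has_vertical_lines_py_alt
    simp only [reduceCtorEq, if_false, List.headD_cons]
    rw [hvlGo_eq_any]
    rw [PySem.List.slice_from_one]
    simp only [List.tail_cons]
    rw [any_id_eq_range, hvlFold_length, List.length_map]
    apply any_congr_mem
    intro c hc
    have hcW : c < g0.length := List.mem_range.mp hc
    rw [hvlFold_getD]
    have hinit : ((g0.map (fun v => decide (v ≠ 0))).getD c false) = decide (g0.getD c 0 ≠ 0) := by
      rw [List.getD_eq_getElem?_getD, List.getElem?_map, List.getElem?_eq_getElem hcW]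
      simp [List.getD_eq_getElem?_getD, List.getElem?_eq_getElem hcW]
    rw [hinit, hvlColumn_eq_map]
    rw [Bool.eq_iff_iff]
    simp only [decide_eq_true_eq, Bool.and_eq_true, List.all_eq_true, beq_iff_eq,
      List.map_cons, PySem.List.pyGetD_zero, List.getD_cons_zero]
    rw [ofList_length_one_iff _
      (by simp : (g0.getD c 0 :: gs.map (fun row => row.getD c 0)) ≠ [])]
    simp only [List.headD_cons, List.forall_mem_cons, List.mem_map]
    constructor
    · rintro ⟨⟨-, hall⟩, hnz⟩
      refine ⟨hnz, fun row hrow => ?_⟩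
      exact hall _ ⟨row, hrow, rfl⟩
    · rintro ⟨hnz, hall⟩
      refine ⟨⟨trivial, fun x hx => ?_⟩, hnz⟩
      obtain ⟨row, hrow, rfl⟩ := hx
      exact hall row hrow
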